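-- pv_equiv track=rewrite | github.com/thomhoog/BA_Thesis-BeatGAN | BeatGAN/BeatGAN 2/csvimg/bg2_csvimg.py | getPeaksIndex
-- ===== SOURCE A (Python) =====
-- def getPeakCount(peaksIndex):
--     count = 1
--     for i in range(0,len(peaksIndex),4):
--         if peaksIndex[i] == 1:
--             count = count + 1
--     return count
--
-- def getPeaksIndex(peaksTotal):
--     count = 0
--     index = 0
--     maxPeakCount = 0
--     for i in range(len(peaksTotal)):
--         if (count == 10):
--             break
--         if peaksTotal[i] == 1:
--             count = count + 1
--             newPeakCount = getPeakCount(peaksTotal[i:])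
--             if (maxPeakCount < newPeakCount):
--                 index = i
--                 maxPeakCount = newPeakCount
--     return index
-- ===== SOURCE B (Python) =====
-- def getPeaksIndex(peaksTotal):
--     n = len(peaksTotal)
--     suf = [0] * (n + 4)
--     for j in range(n - 1, -1, -1):
--         suf[j] = (1 if peaksTotal[j] == 1 else 0) + suf[j + 4]
--     index = 0
--     best = 0
--     seen = 0
--     for i, v in enumerate(peaksTotal):
--         if seen == 10:
--             break
--         if v == 1:
--             seen += 1
--             score = 1 + suf[i]
--             if best < score:
--                 best = score
--                 index = i
--     return index
-- ===== Notes on version B (the rewrite author's own statement) =====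
-- stated objective: alternative
-- what changed: A calls getPeakCount to rescan the stride-4 suffix peaksTotal[i:] for every peak it visits; B precomputes a stride-4 suffix-count table in one backward pass (suf[j] = (peaksTotal[j]==1) + suf[j+4]) and reads each peak's score from it in a single forward pass, keeping the same first-10-peaks cutoff, strict first-wins maximum and default index 0.
import Mathlib
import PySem

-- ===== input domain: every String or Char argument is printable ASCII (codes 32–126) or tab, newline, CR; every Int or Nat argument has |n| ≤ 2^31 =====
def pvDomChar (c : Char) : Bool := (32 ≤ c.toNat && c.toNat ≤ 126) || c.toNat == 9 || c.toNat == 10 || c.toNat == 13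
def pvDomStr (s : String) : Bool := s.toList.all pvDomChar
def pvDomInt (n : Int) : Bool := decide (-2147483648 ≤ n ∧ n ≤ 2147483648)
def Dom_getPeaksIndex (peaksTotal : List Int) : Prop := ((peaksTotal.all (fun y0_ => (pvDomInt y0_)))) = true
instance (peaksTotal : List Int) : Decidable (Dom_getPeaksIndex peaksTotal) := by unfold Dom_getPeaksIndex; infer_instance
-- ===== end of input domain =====

-- B replaces A's per-peak stride-4 suffix rescan (getPeakCount on peaksTotal[i:]) by a stride-4
-- suffix-count table built in one backward pass, read in one forward pass (objective: alternative).

-- ===== PORT A =====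
-- helper: count = 1; for i in range(0, len(peaksIndex), 4): if peaksIndex[i] == 1: count += 1
-- (the indices the range yields are always in range, so pyGetD with default 0 is exact)
def getPeakCount (peaksIndex : List Int) : Int :=
  (PySem.List.pyRange 0 peaksIndex.length 4).foldl
    (fun count i => if PySem.List.pyGetD peaksIndex i 0 = 1 then count + 1 else count) 1

-- state = (count, index, maxPeakCount, broken); 'broken' models the break
def getPeaksIndex (peaksTotal : List Int) : Int :=
  let r := (PySem.List.pyRange 0 peaksTotal.length 1).foldl
    (fun (s : Int × Int × Int × Bool) i =>
      let count := s.1; let index := s.2.1; let maxPeakCount := s.2.2.1; let broken := s.2.2.2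
      if broken then s
      else if count = 10 then (count, index, maxPeakCount, true)
      else if PySem.List.pyGetD peaksTotal i 0 = 1 then
        let newPeakCount := getPeakCount (PySem.List.slice peaksTotal (some i) none)
        if maxPeakCount < newPeakCount then (count + 1, i, newPeakCount, false)
        else (count + 1, index, maxPeakCount, false)
      else s)
    (0, 0, 0, false)
  r.2.1

-- ===== PORT B =====
-- backward pass of Source B: suf[j] = (1 if peaksTotal[j]==1 else 0) + suf[j+4], built back to front;
-- 'r.getD 3 0' is the suf[j+4] lookup, the default 0 being Source B's zero padding
def sufTable (xs : List Int) : List Int :=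
  match xs with
  | [] => []
  | x :: rest =>
    let r := sufTable rest
    ((if x = 1 then 1 else 0) + r.getD 3 0) :: r

-- forward pass of Source B; state = (index, best, seen, broken); the suf[i] lookup is in range,
-- so pyGetD with default 0 is exact
def getPeaksIndex_alt (peaksTotal : List Int) : Int :=
  let suf := sufTable peaksTotal
  let r := (PySem.List.enumerate peaksTotal).foldl
    (fun (s : Int × Int × Int × Bool) iv =>
      let index := s.1; let best := s.2.1; let seen := s.2.2.1; let broken := s.2.2.2
      if broken then s
      else if seen = 10 then (index, best, seen, true)
      else if iv.2 = 1 then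
        let score := 1 + PySem.List.pyGetD suf iv.1 0
        if best < score then (iv.1, score, seen + 1, false)
        else (index, best, seen + 1, false)
      else s)
    (0, 0, 0, false)
  r.1

-- ===== PRECONDITION & SPEC =====
def Spec_getPeaksIndex (peaksTotal : List Int) (out : Int) : Prop := out = getPeaksIndex_alt peaksTotal
instance (peaksTotal : List Int) (out : Int) : Decidable (Spec_getPeaksIndex peaksTotal out) := by unfold Spec_getPeaksIndex; infer_instance

-- ===== CLAIM (what is proved, stated in full; the proofs are below) =====
def Claim_equal_getPeaksIndex : Prop := ∀ (peaksTotal : List Int), Dom_getPeaksIndex peaksTotal → Spec_getPeaksIndex peaksTotal (getPeaksIndex peaksTotal)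

-- ===== LEMMAS AND PROOFS =====

theorem sufTable_length (xs : List Int) : (sufTable xs).length = xs.length := by
  induction xs with
  | nil => rfl
  | cons x rest ih => simp [sufTable, ih]

theorem sufTable_drop (xs : List Int) (k : Nat) :
    sufTable (xs.drop k) = (sufTable xs).drop k := by
  induction k generalizing xs with
  | zero => simp
  | succ k ih =>
    cases xs with
    | nil => simp [sufTable]
    | cons x rest => simpa [sufTable] using ih rest

theorem getD_eq_getD_drop {α : Type} (l : List α) (k : Nat) (d : α) :
    l.getD k d = (l.drop k).getD 0 d := by
  simp [List.getD, List.getElem?_drop]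

theorem getPeakCount_countP (xs : List Int) :
    getPeakCount xs =
      1 + ((List.range ((xs.length + 3) / 4)).countP
            (fun k => decide (xs.getD (4 * k) 0 = 1)) : Int) := by
  unfold getPeakCount
  rw [PySem.List.foldl_ite_add_one]
  have h : (PySem.List.pyRange 0 (xs.length : Int) 4).countP
        (fun i => decide (PySem.List.pyGetD xs i 0 = 1))
      = (List.range ((xs.length + 3) / 4)).countP (fun k => decide (xs.getD (4 * k) 0 = 1)) := by
    rw [PySem.List.pyRange_of_pos 0 ((xs.length : Nat) : Int) (by norm_num : (0:Int) < 4)]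
    rw [List.countP_map]
    have hm : (if (0:Int) < ((xs.length : Nat) : Int)
          then ((((xs.length : Nat) : Int) - 0 + 4 - 1) / 4).toNat else 0)
        = (xs.length + 3) / 4 := by
      split_ifs with h <;> omega
    rw [hm]
    apply List.countP_congr
    intro k _
    have hc : (0:Int) + 4 * (k : Int) = ((4 * k : Nat) : Int) := by push_cast; ring
    show (decide (PySem.List.pyGetD xs (0 + 4 * (k:Int)) 0 = 1) = true)
        ↔ (decide (xs.getD (4 * k) 0 = 1) = true)
    rw [hc, PySem.List.pyGetD_natCast]
  rw [h]

theorem sufTable_head (xs : List Int) :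
    ((List.range ((xs.length + 3) / 4)).countP
        (fun k => decide (xs.getD (4 * k) 0 = 1)) : Int)
      = (sufTable xs).getD 0 0 := by
  induction hn : xs.length using Nat.strong_induction_on generalizing xs with
  | _ n ih =>
  subst hn
  cases xs with
  | nil => simp [sufTable]
  | cons x rest =>
    have hm : ((x :: rest).length + 3) / 4 = ((rest.drop 3).length + 3) / 4 + 1 := by
      simp only [List.length_cons, List.length_drop]; omega
    rw [hm, List.range_succ_eq_map, List.countP_cons, List.countP_map]
    have hstep : ∀ k ∈ List.range (((rest.drop 3).length + 3) / 4),
        ((fun k => decide ((x :: rest).getD (4 * k) 0 = 1)) ∘ Nat.succ) k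
          = (fun k => decide ((rest.drop 3).getD (4 * k) 0 = 1)) k := by
      intro k _
      have h4 : 4 * (k + 1) = (3 + 4 * k) + 1 := by ring
      simp only [Function.comp, Nat.succ_eq_add_one, h4, List.getD_cons_succ]
      rw [getD_eq_getD_drop rest (3 + 4 * k) 0]
      have hd : rest.drop (3 + 4 * k) = (rest.drop 3).drop (4 * k) := by
        rw [List.drop_drop]
      rw [hd, ← getD_eq_getD_drop]
    rw [List.countP_congr (fun k hk => by rw [hstep k hk])]
    have hrec := ih ((rest.drop 3).length) (by simp only [List.length_drop, List.length_cons]; omega) (rest.drop 3) rfl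
    have hsuf : (sufTable (x :: rest)).getD 0 0
        = (if x = 1 then 1 else 0) + (sufTable (rest.drop 3)).getD 0 0 := by
      rw [sufTable_drop, ← getD_eq_getD_drop]
      simp [sufTable]
    rw [hsuf, ← hrec]
    have hx : (x :: rest).getD (4 * 0) 0 = x := by simp
    rw [hx]
    push_cast
    by_cases h1 : x = 1
    · simp [h1]; ring
    · simp [h1]

theorem key_score (xs : List Int) (i : Int) (h0 : 0 ≤ i) (hi : i < (xs.length : Int)) :
    getPeakCount (PySem.List.slice xs (some i) none)
      = 1 + PySem.List.pyGetD (sufTable xs) i 0 := by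
  rw [PySem.List.slice_from xs h0, getPeakCount_countP, sufTable_head, sufTable_drop,
    ← getD_eq_getD_drop]
  have hlt : i.toNat < (sufTable xs).length := by rw [sufTable_length]; omega
  rw [PySem.List.pyGetD_eq_getElem (sufTable xs) 0 h0
    (by rw [sufTable_length]; exact hi)]
  simp [List.getD, List.getElem?_eq_getElem hlt]

theorem loop_lemma (xs : List Int) (l : List Int)
    (hmem : ∀ i ∈ l, 0 ≤ i ∧ i < (xs.length : Int)) :
    ∀ (c idx m : Int) (br : Bool),
    List.foldl (fun (s : Int × Int × Int × Bool) (j : Int) =>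
        if s.2.2.2 then s
        else if s.2.2.1 = 10 then (s.1, s.2.1, s.2.2.1, true)
        else if PySem.List.pyGetD xs j 0 = 1 then
          if s.2.1 < 1 + PySem.List.pyGetD (sufTable xs) j 0 then
            (j, 1 + PySem.List.pyGetD (sufTable xs) j 0, s.2.2.1 + 1, false)
          else (s.1, s.2.1, s.2.2.1 + 1, false)
        else s) (idx, m, c, br) l
    = (fun (s : Int × Int × Int × Bool) => (s.2.1, s.2.2.1, s.1, s.2.2.2))
      (List.foldl (fun (s : Int × Int × Int × Bool) (i : Int) =>
        if s.2.2.2 then s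
        else if s.1 = 10 then (s.1, s.2.1, s.2.2.1, true)
        else if PySem.List.pyGetD xs i 0 = 1 then
          if s.2.2.1 < getPeakCount (PySem.List.slice xs (some i) none) then
            (s.1 + 1, i, getPeakCount (PySem.List.slice xs (some i) none), false)
          else (s.1 + 1, s.2.1, s.2.2.1, false)
        else s) (c, idx, m, br) l) := by
  intro c idx m br
  induction l generalizing c idx m br with
  | nil => rfl
  | cons j t ih =>
    have hj := hmem j (by simp)
    have hkey := key_score xs j hj.1 hj.2
    have hmem' : ∀ i ∈ t, 0 ≤ i ∧ i < (xs.length : Int) :=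
      fun i hi => hmem i (List.mem_cons_of_mem _ hi)
    simp only [List.foldl_cons]
    rw [hkey]
    by_cases hbr : br
    · simp only [hbr, if_true]
      exact ih hmem' c idx m true
    · simp only [hbr, if_false, Bool.false_eq_true]
      by_cases hc : c = 10
      · simp only [hc, if_true]
        exact ih hmem' 10 idx m true
      · simp only [if_neg hc]
        by_cases hp : PySem.List.pyGetD xs j 0 = 1
        · simp only [if_pos hp]
          by_cases hlt : m < 1 + PySem.List.pyGetD (sufTable xs) j 0
          · simp only [if_pos hlt]
            exact ih hmem' (c + 1) j (1 + PySem.List.pyGetD (sufTable xs) j 0) false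
          · simp only [if_neg hlt]
            exact ih hmem' (c + 1) idx m false
        · simp only [if_neg hp]
          exact ih hmem' c idx m false

theorem main_eq (xs : List Int) : getPeaksIndex xs = getPeaksIndex_alt xs := by
  have hmem : ∀ i ∈ PySem.List.pyRange 0 (xs.length : Int) 1, 0 ≤ i ∧ i < (xs.length : Int) :=
    fun i hi => PySem.List.mem_pyRange_one.mp hi
  have h := loop_lemma xs (PySem.List.pyRange 0 (xs.length : Int) 1) hmem 0 0 0 false
  have e := congrArg (fun (s : Int × Int × Int × Bool) => s.1) h
  unfold getPeaksIndex getPeaksIndex_alt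
  simp only [PySem.List.enumerate_eq_map_pyRange xs 0, PySem.List.len_eq, List.foldl_map]
  exact e.symm

-- ===== VERDICT (by name: the statement is the Claim_ definition above) =====
theorem getPeaksIndex_spec : Claim_equal_getPeaksIndex := by
  intro peaksTotal _
  unfold Spec_getPeaksIndex
  exact main_eq peaksTotal
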